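-- pv_equiv track=rewrite | github.com/Deepak-Laksman/DSA-Implementations-Python | DynamicProgramming/SequencePatternMatching.py | isAaSubsequenceOfB
-- ===== SOURCE A (Python) =====
-- def isAaSubsequenceOfB(text, pattern, n, m):
--     dp = [[False for i in range(m + 1)] for j in range(n + 1)]
--     for i in range(1, n + 1):
--         for j in range(1, m + 1):
--             if text[i - 1] == pattern[j - 1]:
--                 dp[i][j] = True
--             else:
--                 dp[i][j] = dp[i - 1][j] or dp[i][j - 1]
--     return dp[n][m]
-- ===== SOURCE B (Python) =====
-- def isAaSubsequenceOfB(text, pattern, n, m):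
--     return bool(set(text[:n]) & set(pattern[:m]))
-- ===== Notes on version B (the rewrite author's own statement) =====
-- stated objective: faster
-- what changed: Replaces the O(n*m) boolean DP reachability table with a direct set-intersection test on the two prefixes: the result is simply whether text[:n] and pattern[:m] share a character.
-- outside the precondition, e.g. on isAaSubsequenceOfB('ab', 'b', 5, 1): A raises IndexError, B returns True
import Mathlib
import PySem

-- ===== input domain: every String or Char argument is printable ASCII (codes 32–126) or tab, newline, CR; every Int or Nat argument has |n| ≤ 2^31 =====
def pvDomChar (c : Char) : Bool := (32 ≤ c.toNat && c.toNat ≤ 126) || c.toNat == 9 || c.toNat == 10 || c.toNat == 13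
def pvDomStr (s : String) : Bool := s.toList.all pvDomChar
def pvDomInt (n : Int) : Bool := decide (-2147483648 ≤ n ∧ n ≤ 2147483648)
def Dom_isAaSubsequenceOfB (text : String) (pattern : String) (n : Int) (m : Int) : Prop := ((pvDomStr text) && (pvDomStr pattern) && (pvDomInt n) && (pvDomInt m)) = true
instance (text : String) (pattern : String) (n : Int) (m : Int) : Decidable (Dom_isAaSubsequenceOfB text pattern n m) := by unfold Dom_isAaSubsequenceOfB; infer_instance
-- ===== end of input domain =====

-- B replaces A's O(n*m) DP reachability table with a set-intersection test on the two prefixes (faster).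

-- ===== PORT A =====
def isAaSubsequenceOfB (text : String) (pattern : String) (n : Int) (m : Int) : Bool :=
  let t := text.toList
  let p := pattern.toList
  let dp0 : List (List Bool) :=
    (PySem.List.pyRange 0 (n + 1) 1).map (fun _ =>
      (PySem.List.pyRange 0 (m + 1) 1).map (fun _ => false))
  let dp :=
    (PySem.List.pyRange 1 (n + 1) 1).foldl (fun dp i =>
      (PySem.List.pyRange 1 (m + 1) 1).foldl (fun dp j =>
        let v :=
          if PySem.List.pyGetD t (i - 1) ' ' == PySem.List.pyGetD p (j - 1) ' ' then true
          else PySem.List.pyGetD (PySem.List.pyGetD dp (i - 1) []) j false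
               || PySem.List.pyGetD (PySem.List.pyGetD dp i []) (j - 1) false
        PySem.List.pySetD dp i (PySem.List.pySetD (PySem.List.pyGetD dp i []) j v)) dp) dp0
  PySem.List.pyGetD (PySem.List.pyGetD dp n []) m false

-- ===== PORT B =====
def isAaSubsequenceOfB_alt (text : String) (pattern : String) (n : Int) (m : Int) : Bool :=
  let s1 : PySem.Set Char := PySem.Set.ofList (PySem.List.slice text.toList none (some n))
  let s2 : PySem.Set Char := PySem.Set.ofList (PySem.List.slice pattern.toList none (some m))
  !(PySem.Set.inter s1 s2).isEmpty

-- ===== PRECONDITION & SPEC =====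
-- Pre_ excludes exactly the inputs where A raises: negative n or m (empty/negatively-indexed dp
-- table → IndexError) and n/m beyond the string lengths while both loops run (text[i-1] /
-- pattern[j-1] IndexError); when n = 0 or m = 0 the loops never index, so any n, m ≥ 0 is fine.
def Pre_isAaSubsequenceOfB (text : String) (pattern : String) (n : Int) (m : Int) : Prop :=
  0 ≤ n ∧ 0 ≤ m ∧ (n = 0 ∨ m = 0 ∨ (n ≤ PySem.Str.len text ∧ m ≤ PySem.Str.len pattern))
instance (text : String) (pattern : String) (n : Int) (m : Int) : Decidable (Pre_isAaSubsequenceOfB text pattern n m) := by unfold Pre_isAaSubsequenceOfB; infer_instance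

def pvWitness_isAaSubsequenceOfB : String × String × Int × Int := ("ab", "bc", 2, 2)

def Spec_isAaSubsequenceOfB (text : String) (pattern : String) (n : Int) (m : Int) (out : Bool) : Prop :=
  out = isAaSubsequenceOfB_alt text pattern n m
instance (text : String) (pattern : String) (n : Int) (m : Int) (out : Bool) : Decidable (Spec_isAaSubsequenceOfB text pattern n m out) := by unfold Spec_isAaSubsequenceOfB; infer_instance

-- ===== CLAIM =====
def Claim_equal_isAaSubsequenceOfB : Prop := ∀ (text : String) (pattern : String) (n : Int) (m : Int), Dom_isAaSubsequenceOfB text pattern n m → Pre_isAaSubsequenceOfB text pattern n m → Spec_isAaSubsequenceOfB text pattern n m (isAaSubsequenceOfB text pattern n m)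

-- ===== LEMMAS AND PROOFS =====

-- dp[i][j] of A's table is reachability: some a < i, b < j with t[a] = p[b].
def pvHit (t p : List Char) (i j : Nat) : Bool :=
  decide (∃ a, a < i ∧ ∃ b, b < j ∧ t.getD a ' ' = p.getD b ' ')

-- the value of cell (r, c) after A has processed rows 1..i-1 fully and row i up to column j
def pvVal (t p : List Char) (i j r c : Nat) : Bool :=
  if r < i ∨ (r = i ∧ c ≤ j) then pvHit t p r c else false

def pvTbl (t p : List Char) (N M i j : Nat) : List (List Bool) :=
  (List.range (N + 1)).map (fun r => (List.range (M + 1)).map (fun c => pvVal t p i j r c))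

-- the inner loop body of A, as it appears in the port
def pvStep (t p : List Char) (dp : List (List Bool)) (i j : Int) : List (List Bool) :=
  let v :=
    if PySem.List.pyGetD t (i - 1) ' ' == PySem.List.pyGetD p (j - 1) ' ' then true
    else PySem.List.pyGetD (PySem.List.pyGetD dp (i - 1) []) j false
         || PySem.List.pyGetD (PySem.List.pyGetD dp i []) (j - 1) false
  PySem.List.pySetD dp i (PySem.List.pySetD (PySem.List.pyGetD dp i []) j v)

theorem pvHit_succ (t p : List Char) (r c : Nat) :
    pvHit t p (r + 1) (c + 1) =
      (decide (t.getD r ' ' = p.getD c ' ') || pvHit t p r (c + 1) || pvHit t p (r + 1) c) := by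
  simp only [pvHit]
  rw [Bool.eq_iff_iff]
  simp only [Bool.or_eq_true, decide_eq_true_eq]
  constructor
  · rintro ⟨a, ha, b, hb, h⟩
    by_cases har : a < r
    · exact Or.inl (Or.inr ⟨a, har, b, hb, h⟩)
    · by_cases hbc : b < c
      · exact Or.inr ⟨a, ha, b, hbc, h⟩
      · have hh : a = r ∧ b = c := by omega
        exact Or.inl (Or.inl (hh.1 ▸ hh.2 ▸ h))
  · rintro ((h | ⟨a, ha, b, hb, h⟩) | ⟨a, ha, b, hb, h⟩)
    · exact ⟨r, by omega, c, by omega, h⟩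
    · exact ⟨a, by omega, b, hb, h⟩
    · exact ⟨a, ha, b, by omega, h⟩

theorem pvVal_roll (t p : List Char) (i r c M : Nat) (hc : c ≤ M) :
    pvVal t p i M r c = pvVal t p (i + 1) 0 r c := by
  unfold pvVal
  split_ifs with h1 h2 h2
  · rfl
  · omega
  · have : r = i + 1 ∧ c = 0 := by omega
    rw [this.1, this.2]
    simp [pvHit]
  · rfl

theorem pvTbl_roll (t p : List Char) (N M i : Nat) :
    pvTbl t p N M i M = pvTbl t p N M (i + 1) 0 := by
  unfold pvTbl
  apply List.map_congr_left
  intro r _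
  apply List.map_congr_left
  intro c hc
  exact pvVal_roll t p i r c M (by simpa using Nat.lt_succ_iff.mp (List.mem_range.mp hc))

theorem pvHit_zero_left (t p : List Char) (j : Nat) : pvHit t p 0 j = false := by
  simp [pvHit]

theorem pvVal_lt (t p : List Char) (i j r c : Nat) (h : r < i) :
    pvVal t p i j r c = pvHit t p r c := by
  simp [pvVal, h]

theorem pvVal_self (t p : List Char) (i j c : Nat) (h : c ≤ j) :
    pvVal t p i j i c = pvHit t p i c := by
  simp [pvVal, h]

theorem pvStep_tbl (t p : List Char) (N M a b : Nat) (ha : a + 1 ≤ N) (hb : b + 1 ≤ M) :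
    pvStep t p (pvTbl t p N M (a + 1) b) ((a : Int) + 1) ((b : Int) + 1) =
      pvTbl t p N M (a + 1) (b + 1) := by
  have hcast : ((a : Int) + 1) = ((a + 1 : Nat) : Int) := by push_cast; ring
  have hcast' : ((b : Int) + 1) = ((b + 1 : Nat) : Int) := by push_cast; ring
  have e1 : (((a + 1 : Nat) : Int) - 1) = ((a : Nat) : Int) := by push_cast; ring
  have e2 : (((b + 1 : Nat) : Int) - 1) = ((b : Nat) : Int) := by push_cast; ring
  unfold pvStep
  rw [hcast, hcast', e1, e2]
  simp only [PySem.List.pyGetD_natCast, PySem.List.pySetD_natCast]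
  conv_lhs => rw [pvTbl]
  rw [PySem.List.getD_map_range _ _ _ _ (by omega), PySem.List.getD_map_range _ _ _ _ (by omega),
      PySem.List.getD_map_range _ _ _ _ (by omega), PySem.List.getD_map_range _ _ _ _ (by omega)]
  rw [pvVal_lt t p (a+1) b a (b+1) (by omega), pvVal_self t p (a+1) b b (by omega)]
  have hv : (if t.getD a ' ' == p.getD b ' ' then true
             else pvHit t p a (b + 1) || pvHit t p (a + 1) b) = pvHit t p (a + 1) (b + 1) := by
    rw [pvHit_succ]
    by_cases h : t.getD a ' ' = p.getD b ' '
    · simp only [List.getD] at h ⊢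
      simp [h]
    · simp only [List.getD] at h ⊢
      simp [h]
  rw [hv]
  apply List.ext_getElem
  · simp [pvTbl]
  · intro r hr1 hr2
    simp only [pvTbl, List.length_set, List.length_map, List.length_range] at hr1 hr2
    simp only [pvTbl, List.getElem_map, List.getElem_range]
    by_cases hra : r = a + 1
    · subst hra
      rw [List.getElem_set_self (by simp; omega)]
      apply List.ext_getElem
      · simp
      · intro c hc1 hc2
        simp only [List.length_set, List.length_map, List.length_range] at hc1 hc2
        by_cases hcb : c = b + 1
        · subst hcb
          rw [List.getElem_set_self (by simp; omega), List.getElem_map, List.getElem_range,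
              pvVal_self t p (a+1) (b+1) (b+1) (by omega)]
        · rw [List.getElem_set_ne (by omega)]
          simp only [List.getElem_map, List.getElem_range]
          unfold pvVal
          rw [if_congr (show ((a+1) < a + 1 ∨ ((a+1) = a + 1 ∧ c ≤ b)) ↔
              ((a+1) < a + 1 ∨ ((a+1) = a + 1 ∧ c ≤ b + 1)) by omega) rfl rfl]
    · rw [List.getElem_set_ne (by omega), List.getElem_map, List.getElem_range]
      apply List.map_congr_left
      intro c _
      unfold pvVal
      rw [if_congr (show (r < a + 1 ∨ (r = a + 1 ∧ c ≤ b)) ↔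
          (r < a + 1 ∨ (r = a + 1 ∧ c ≤ b + 1)) by omega) rfl rfl]

theorem pvInnerAux (t p : List Char) (N M a : Nat) (ha : a + 1 ≤ N) :
    ∀ j, j ≤ M → (List.range j).foldl
        (fun dp (k : Nat) => pvStep t p dp ((a : Int) + 1) (1 + (k : Int)))
        (pvTbl t p N M (a + 1) 0) = pvTbl t p N M (a + 1) j := by
  intro j
  induction j with
  | zero => intro _; rfl
  | succ j ih =>
    intro hj
    rw [List.range_succ, List.foldl_append, ih (by omega), List.foldl_cons, List.foldl_nil]
    have e : (1 + (j : Int)) = ((j : Int) + 1) := by ring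
    rw [e]
    exact pvStep_tbl t p N M a j ha hj

theorem pvInnerFold (t p : List Char) (N M a : Nat) (ha : a + 1 ≤ N) :
    (PySem.List.pyRange 1 ((M : Int) + 1) 1).foldl
        (fun dp j => pvStep t p dp ((a : Int) + 1) j) (pvTbl t p N M (a + 1) 0) =
      pvTbl t p N M (a + 1) M := by
  rw [PySem.List.pyRange_one, List.foldl_map]
  have e : ((M : Int) + 1 - 1).toNat = M := by omega
  rw [e]
  exact pvInnerAux t p N M a ha M le_rfl

theorem pvOuterAux (t p : List Char) (N M : Nat) :
    ∀ i, i ≤ N → (List.range i).foldl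
        (fun dp (k : Nat) => (PySem.List.pyRange 1 ((M : Int) + 1) 1).foldl
          (fun dp j => pvStep t p dp (1 + (k : Int)) j) dp)
        (pvTbl t p N M 0 M) = pvTbl t p N M i M := by
  intro i
  induction i with
  | zero => intro _; rfl
  | succ i ih =>
    intro hi
    rw [List.range_succ, List.foldl_append, ih (by omega), List.foldl_cons, List.foldl_nil]
    have e : (1 + (i : Int)) = ((i : Int) + 1) := by ring
    simp only [e]
    rw [pvTbl_roll]
    exact pvInnerFold t p N M i hi

theorem pvOuterFold (t p : List Char) (N M : Nat) :
    (PySem.List.pyRange 1 ((N : Int) + 1) 1).foldl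
        (fun dp i => (PySem.List.pyRange 1 ((M : Int) + 1) 1).foldl
          (fun dp j => pvStep t p dp i j) dp) (pvTbl t p N M 0 M) =
      pvTbl t p N M N M := by
  rw [PySem.List.pyRange_one 1 ((N : Int) + 1), List.foldl_map]
  have e : ((N : Int) + 1 - 1).toNat = N := by omega
  rw [e]
  exact pvOuterAux t p N M N le_rfl

theorem pvDp0 (t p : List Char) (N M : Nat) :
    (PySem.List.pyRange 0 ((N : Int) + 1) 1).map (fun _ =>
        (PySem.List.pyRange 0 ((M : Int) + 1) 1).map (fun _ => false)) =
      pvTbl t p N M 0 M := by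
  rw [PySem.List.pyRange_one, PySem.List.pyRange_one]
  have eN : ((N : Int) + 1 - 0).toNat = N + 1 := by omega
  have eM : ((M : Int) + 1 - 0).toNat = M + 1 := by omega
  rw [eN, eM, List.map_map, List.map_map]
  unfold pvTbl
  apply List.map_congr_left
  intro r _
  apply List.map_congr_left
  intro c _
  simp only [Function.comp]
  unfold pvVal
  split_ifs with h
  · rcases h with h | ⟨h, _⟩
    · omega
    · rw [h, pvHit_zero_left]
  · rfl

theorem pvA_eq_hit (text pattern : String) (N M : Nat) :
    isAaSubsequenceOfB text pattern (N : Int) (M : Int) =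
      pvHit text.toList pattern.toList N M := by
  simp only [isAaSubsequenceOfB]
  have h0 := pvDp0 text.toList pattern.toList N M
  have h1 := pvOuterFold text.toList pattern.toList N M
  simp only [pvStep] at h1
  rw [h0, h1]
  simp only [PySem.List.pyGetD_natCast]
  rw [pvTbl, PySem.List.getD_map_range _ _ _ _ (by omega),
      PySem.List.getD_map_range _ _ _ _ (by omega), pvVal_self _ _ _ _ _ le_rfl]

theorem pvB_iff (text pattern : String) (N M : Nat) :
    isAaSubsequenceOfB_alt text pattern (N : Int) (M : Int) = true ↔
      ∃ c, c ∈ text.toList.take N ∧ c ∈ pattern.toList.take M := by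
  simp only [isAaSubsequenceOfB_alt]
  rw [PySem.List.slice_to _ (by omega), PySem.List.slice_to _ (by omega)]
  simp [PySem.Set.inter, List.isEmpty_eq_false_iff, List.eq_nil_iff_forall_not_mem,
        PySem.Set.mem_ofList]

theorem pvHit_iff (t p : List Char) (N M : Nat)
    (hb : N = 0 ∨ M = 0 ∨ (N ≤ t.length ∧ M ≤ p.length)) :
    pvHit t p N M = true ↔ ∃ c, c ∈ t.take N ∧ c ∈ p.take M := by
  simp only [pvHit, decide_eq_true_eq]
  constructor
  · rintro ⟨a, ha, b, hbm, h⟩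
    have hNl : N ≤ t.length ∧ M ≤ p.length := by rcases hb with h' | h' | h' <;> omega
    have hat : a < t.length := by omega
    have hbp : b < p.length := by omega
    refine ⟨t[a], ?_, ?_⟩
    · rw [List.mem_iff_getElem]
      exact ⟨a, by simp; omega, by rw [List.getElem_take]⟩
    · rw [List.getD_eq_getElem t ' ' hat, List.getD_eq_getElem p ' ' hbp] at h
      rw [List.mem_iff_getElem]
      exact ⟨b, by simp; omega, by rw [List.getElem_take, ← h]⟩
  · rintro ⟨c, hct, hcp⟩
    rw [List.mem_iff_getElem] at hct hcp
    obtain ⟨a, hal, hae⟩ := hct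
    obtain ⟨b, hbl, hbe⟩ := hcp
    simp only [List.length_take] at hal hbl
    refine ⟨a, by omega, b, by omega, ?_⟩
    rw [List.getElem_take] at hae hbe
    rw [List.getD_eq_getElem t ' ' (by omega), List.getD_eq_getElem p ' ' (by omega), hae, hbe]

-- ===== VERDICT =====
theorem isAaSubsequenceOfB_spec : Claim_equal_isAaSubsequenceOfB := by
  intro text pattern n m _ hpre
  obtain ⟨hn, hm, hb⟩ := hpre
  obtain ⟨N, rfl⟩ := Int.eq_ofNat_of_zero_le hn
  obtain ⟨M, rfl⟩ := Int.eq_ofNat_of_zero_le hm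
  rw [PySem.Str.len_eq, PySem.Str.len_eq] at hb
  unfold Spec_isAaSubsequenceOfB
  rw [pvA_eq_hit, Bool.eq_iff_iff, pvB_iff]
  exact pvHit_iff text.toList pattern.toList N M (by omega)
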